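-- pv_equiv track=rewrite | github.com/Sameshuuga/Learning | symbol.py | symboltable
-- ===== SOURCE A (Python) =====
-- def symboltable (codelist):
--     import copy
--     ram = {'R0':0,'R1':1, 'R2':2, 'R3':3,'R4':4,'R5':5,'R6':6,'R7':7,'R8':8,'R9':9,'R10':10,'R11':11,'R12':12,'R13':13,'R14':14,'R15':15,'SP':0,'LCL':1,'ARG':2,'THIS':3,'THAT':4,'SCREEN':16384,'KBD':24576}
--     symbol = 15
--     tracklist = copy.copy(codelist)
--     for item in codelist:
--         if item [0] == '(':
--             ram[item[1:-1]] = tracklist.index(item)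
--             del tracklist[tracklist.index(item)]
--     for item in codelist:
--         if item[0] == '@':
--             if item[1:] not in ram:
--                 try:
--                     int(item[1:])
--                     continue
--                 except:ValueError
--                 symbol = symbol + 1
--                 ram[item[1:]] = symbol
--
--     return ram
-- ===== SOURCE B (Python) =====
-- def _isint(s):
--     try:
--         int(s)
--         return True
--     except ValueError:
--         return False
--
-- def symboltable(codelist):
--     ram = {'R0':0,'R1':1, 'R2':2, 'R3':3,'R4':4,'R5':5,'R6':6,'R7':7,'R8':8,'R9':9,'R10':10,'R11':11,'R12':12,'R13':13,'R14':14,'R15':15,'SP':0,'LCL':1,'ARG':2,'THIS':3,'THAT':4,'SCREEN':16384,'KBD':24576}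
--     counter = 0
--     for item in codelist:
--         if item.startswith('('):
--             ram[item[1:-1]] = counter
--         else:
--             counter += 1
--     symbol = 15
--     for item in codelist:
--         if item.startswith('@'):
--             key = item[1:]
--             if key not in ram and not _isint(key):
--                 symbol += 1
--                 ram[key] = symbol
--     return ram
-- ===== Notes on version B (the rewrite author's own statement) =====
-- stated objective: faster
-- what changed: B replaces A's first pass (copy the list and, for every label line, scan it with list.index and delete the entry) by a single pass with a running instruction counter that directly gives each label's address; the second pass keeps the same logic but is decomposed with startswith and an _isint helper.
-- crash fix: On any list containing an empty string A raises IndexError at item[0]; B's startswith test skips such lines and it returns the symbol table built from the remaining lines. — e.g. on symboltable([""]): A raises IndexError, B returns [("R0",0),("R1",1),("R2",2),("R3",3),("R4",4),("R5",5),("R6",6),("R7",7), ("R8",8),("R9",9),("R10",10),("R11",11),("R12…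
import Mathlib
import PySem

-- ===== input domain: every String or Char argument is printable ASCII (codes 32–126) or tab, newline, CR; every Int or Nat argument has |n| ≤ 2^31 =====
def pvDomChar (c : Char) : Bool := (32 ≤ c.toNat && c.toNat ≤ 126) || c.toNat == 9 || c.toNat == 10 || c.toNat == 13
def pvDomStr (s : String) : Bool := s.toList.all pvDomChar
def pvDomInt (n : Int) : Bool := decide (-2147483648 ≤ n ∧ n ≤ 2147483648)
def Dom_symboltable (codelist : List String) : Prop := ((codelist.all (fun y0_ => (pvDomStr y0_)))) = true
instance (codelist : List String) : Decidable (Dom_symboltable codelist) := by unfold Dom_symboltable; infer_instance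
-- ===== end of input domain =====

-- B replaces A's quadratic first pass (list copy + list.index/del per label) by a running
-- instruction counter in one pass; equivalence of the returned table is proved below.

-- ===== PORT A =====
-- the predefined-symbol dict A builds first (shared literal constant)
def pvRam0 : PySem.Dict String Int :=
  PySem.Dict.ofList [("R0",0),("R1",1),("R2",2),("R3",3),("R4",4),("R5",5),("R6",6),("R7",7),
    ("R8",8),("R9",9),("R10",10),("R11",11),("R12",12),("R13",13),("R14",14),("R15",15),
    ("SP",0),("LCL",1),("ARG",2),("THIS",3),("THAT",4),("SCREEN",16384),("KBD",24576)]

-- A's first loop: state (ram, tracklist); 'item[0]' raises on "" (none branch, excluded by Pre_)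
def pvBodyA1 (st : PySem.Dict String Int × List String) (item : String) :
    PySem.Dict String Int × List String :=
  match PySem.Str.pyGet? item 0 with
  | some c =>
    if c = '(' then
      match PySem.List.index? st.2 item with
      | some k => (st.1.insert (PySem.Str.slice item (some 1) (some (-1))) (k : Int),
                   st.2.eraseIdx k)
      | none => st  -- ValueError: unreachable, item is in tracklist
    else st
  | none => st

-- A's second loop: state (ram, symbol); try int(...)/continue ported as the match on ofStr?
def pvBodyA2 (st : PySem.Dict String Int × Int) (item : String) :
    PySem.Dict String Int × Int :=
  match PySem.Str.pyGet? item 0 with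
  | some c =>
    if c = '@' then
      let key := PySem.Str.slice item (some 1) none
      if st.1.contains key then st
      else
        match PySem.Int.ofStr? key with
        | some _ => st
        | none => (st.1.insert key (st.2 + 1), st.2 + 1)
    else st
  | none => st

def symboltable (codelist : List String) : List (String × Int) :=
  let st1 := codelist.foldl pvBodyA1 (pvRam0, codelist)
  let st2 := codelist.foldl pvBodyA2 (st1.1, 15)
  st2.1.items

-- ===== PORT B =====
def pvIsint (s : String) : Bool := (PySem.Int.ofStr? s).isSome

-- B's first loop: running instruction counter
def pvBodyB1 (st : PySem.Dict String Int × Int) (item : String) :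
    PySem.Dict String Int × Int :=
  if PySem.Str.startswith item "(" then
    (st.1.insert (PySem.Str.slice item (some 1) (some (-1))) st.2, st.2)
  else
    (st.1, st.2 + 1)

-- B's second loop
def pvBodyB2 (st : PySem.Dict String Int × Int) (item : String) :
    PySem.Dict String Int × Int :=
  if PySem.Str.startswith item "@" then
    let key := PySem.Str.slice item (some 1) none
    if !st.1.contains key && !pvIsint key then
      (st.1.insert key (st.2 + 1), st.2 + 1)
    else st
  else st

def symboltable_alt (codelist : List String) : List (String × Int) :=
  let st1 := codelist.foldl pvBodyB1 (pvRam0, 0)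
  let st2 := codelist.foldl pvBodyB2 (st1.1, 15)
  st2.1.items

-- ===== PRECONDITION & SPEC =====
-- Pre_ excludes exactly the inputs on which A raises: any list containing the empty string
-- (A evaluates item[0] on every line → IndexError).
def Pre_symboltable (codelist : List String) : Prop := ∀ s ∈ codelist, s ≠ ""
instance (codelist : List String) : Decidable (Pre_symboltable codelist) := by
  unfold Pre_symboltable; infer_instance

def pvWitness_symboltable : List String := ["(LOOP)", "@x", "@LOOP", "@7", "(END)", "@END"]

-- A raises IndexError on any list containing ""; B skips such lines and returns the table
-- (theorem symboltable_raises at the bottom of the file).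
def Raises_symboltable (codelist : List String) : Prop := "" ∈ codelist
instance (codelist : List String) : Decidable (Raises_symboltable codelist) := by
  unfold Raises_symboltable; infer_instance
def pvRaiseWitness_symboltable : List String := [""]
def pvRaiseWitnessOut_symboltable : List (String × Int) :=
  [("R0",0),("R1",1),("R2",2),("R3",3),("R4",4),("R5",5),("R6",6),("R7",7),
   ("R8",8),("R9",9),("R10",10),("R11",11),("R12",12),("R13",13),("R14",14),("R15",15),
   ("SP",0),("LCL",1),("ARG",2),("THIS",3),("THAT",4),("SCREEN",16384),("KBD",24576)]

def Spec_symboltable (codelist : List String) (out : List (String × Int)) : Prop :=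
  out = symboltable_alt codelist
instance (codelist : List String) (out : List (String × Int)) :
    Decidable (Spec_symboltable codelist out) := by unfold Spec_symboltable; infer_instance

-- ===== CLAIM (what is proved, stated in full; the proofs are below) =====
def Claim_equal_symboltable : Prop := ∀ (codelist : List String), Dom_symboltable codelist →
  Pre_symboltable codelist → Spec_symboltable codelist (symboltable codelist)

def Claim_raises_symboltable : Prop :=
  (∀ (codelist : List String), Dom_symboltable codelist → Raises_symboltable codelist →
    ¬ Pre_symboltable codelist) ∧
  (Dom_symboltable (pvRaiseWitness_symboltable) ∧ Raises_symboltable (pvRaiseWitness_symboltable) ∧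
    symboltable_alt (pvRaiseWitness_symboltable) = pvRaiseWitnessOut_symboltable)

-- ===== LEMMAS AND PROOFS =====

-- a nonempty string starts with the one-character string [p] iff its first character is p
theorem pvStartswith_cons (item : String) (c : Char) (cs : List Char) (p : Char)
    (h : item.toList = c :: cs) :
    PySem.Str.startswith item (String.ofList [p]) = (c == p) := by
  simp [PySem.Str.startswith, PySem.Chars.startswith, h, List.isPrefixOf, BEq.comm]

theorem pvStartswith_nil (item : String) (p : Char) (h : item.toList = []) :
    PySem.Str.startswith item (String.ofList [p]) = false := by
  simp [PySem.Str.startswith, PySem.Chars.startswith, h, List.isPrefixOf]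

theorem pvPyGet0 (item : String) (c : Char) (cs : List Char) (h : item.toList = c :: cs) :
    PySem.Str.pyGet? item 0 = some c := by
  simp [PySem.Str.pyGet?, PySem.Chars.pyGet?_eq_listPyGet?, h, PySem.List.pyGet?, PySem.List.pyIdx?]

theorem pvPyGetNil (item : String) (h : item.toList = []) :
    PySem.Str.pyGet? item 0 = none := by
  simp [PySem.Str.pyGet?, PySem.Chars.pyGet?_eq_listPyGet?, h, PySem.List.pyGet?, PySem.List.pyIdx?]

theorem pvEraseIdxMid (l l' : List String) (x : String) :
    (l ++ x :: l').eraseIdx l.length = l ++ l' := by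
  induction l with
  | nil => simp
  | cons a t ih => simpa using ih

-- the two second-pass bodies agree on every state and item (including the empty string)
theorem pvBody2_eq (st : PySem.Dict String Int × Int) (item : String) :
    pvBodyA2 st item = pvBodyB2 st item := by
  have hat : ("@" : String) = String.ofList ['@'] := rfl
  cases h : item.toList with
  | nil =>
    rw [pvBodyA2, pvBodyB2, hat, pvPyGetNil item h, pvStartswith_nil item '@' h]
    simp
  | cons c cs =>
    rw [pvBodyA2, pvBodyB2, hat, pvPyGet0 item c cs h, pvStartswith_cons item c cs '@' h]
    by_cases hc : c = '@'
    · simp only [hc, beq_self_eq_true, if_true]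
      by_cases hk : st.1.contains (PySem.Str.slice item (some 1) none)
      · simp [hk]
      · simp only [hk, Bool.not_false, Bool.true_and]
        cases ho : PySem.Int.ofStr? (PySem.Str.slice item (some 1) none) with
        | some v => simp [pvIsint, ho]
        | none => simp [pvIsint, ho]
    · simp [hc]

-- pass-1 invariant: A's tracklist is (non-label prefix so far) ++ (remaining lines) and B's
-- counter is the length of that prefix; the two rams stay equal.
theorem pvPass1 (l : List String) (fp : List String) (ram : PySem.Dict String Int)
    (hfp : ∀ s ∈ fp, PySem.Str.startswith s "(" = false)
    (hl : ∀ s ∈ l, s ≠ "") :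
    (l.foldl pvBodyA1 (ram, fp ++ l)).1 = (l.foldl pvBodyB1 (ram, (fp.length : Int))).1 := by
  induction l generalizing fp ram with
  | nil => rfl
  | cons item l' ih =>
    have hlp : ("(" : String) = String.ofList ['('] := rfl
    have hne : item ≠ "" := hl item (List.mem_cons_self)
    obtain ⟨c, cs, h⟩ : ∃ c cs, item.toList = c :: cs := by
      cases hh : item.toList with
      | nil => exact absurd (String.toList_eq_nil_iff.mp hh) hne
      | cons a b => exact ⟨a, b, rfl⟩
    have hl' : ∀ s ∈ l', s ≠ "" := fun s hs => hl s (List.mem_cons_of_mem _ hs)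
    rw [List.foldl_cons, List.foldl_cons, pvBodyA1, pvBodyB1, hlp,
      pvPyGet0 item c cs h, pvStartswith_cons item c cs '(' h]
    by_cases hc : c = '('
    · -- label line: A finds item at index fp.length of the tracklist and deletes it there
      have hnotmem : item ∉ fp := by
        intro hm
        have := hfp item hm
        rw [hlp, pvStartswith_cons item c cs '(' h, hc] at this
        simp at this
      have hidx : PySem.List.index? (fp ++ item :: l') item = some fp.length :=
        (PySem.List.index?_eq_some_iff _ _ _).mpr ⟨fp, l', rfl, rfl, hnotmem⟩
      simp only [hc, beq_self_eq_true, if_true, hidx, pvEraseIdxMid]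
      exact ih fp _ hfp hl'
    · -- instruction line: the item joins the non-label prefix, the counter advances
      have hfp' : ∀ s ∈ fp ++ [item], PySem.Str.startswith s "(" = false := by
        intro s hs
        rcases List.mem_append.mp hs with hs | hs
        · exact hfp s hs
        · rw [List.mem_singleton.mp hs, hlp, pvStartswith_cons item c cs '(' h]
          simpa using hc
      have := ih (fp ++ [item]) ram hfp' hl'
      simp only [List.append_assoc, List.cons_append, List.nil_append] at this
      simp only [hc, beq_iff_eq, if_false]
      rw [this]
      norm_num

-- ===== VERDICT (by name: the statement is the Claim_ definition above) =====
theorem symboltable_spec : Claim_equal_symboltable := by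
  intro codelist _ hpre
  unfold Spec_symboltable
  have h1 := pvPass1 codelist [] pvRam0 (by simp) hpre
  simp only [List.nil_append, List.length_nil, Int.natCast_zero] at h1
  show (codelist.foldl pvBodyA2 ((codelist.foldl pvBodyA1 (pvRam0, codelist)).1, 15)).1.items =
    (codelist.foldl pvBodyB2 ((codelist.foldl pvBodyB1 (pvRam0, 0)).1, 15)).1.items
  have hb : pvBodyA2 = pvBodyB2 := funext fun st => funext fun item => pvBody2_eq st item
  rw [h1, hb]

@[simp] theorem symboltable_raises : Claim_raises_symboltable := by
  unfold Claim_raises_symboltable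
  constructor
  · intro codelist _ hr hpre; exact hpre "" hr rfl
  · refine ⟨by decide, by decide, by decide⟩
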